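-- pv_equiv track=rewrite | github.com/MousePotatoDoesStuff/Miniprojects | smaller projects/logic_gate_finder.py | generate_perms_marked
-- ===== SOURCE A (Python) =====
-- def generate_perms_marked(data):
--     variants={E:[] for E in set(data)}
--     for i in range(len(data)):
--         variants[data[i]].append(i)
--     variants.pop(0)
--     variants.pop(1)
--     L=list(variants.keys())
--     L.sort()
--     M = [data]
--     for var in L:
--         indices=variants[var]
--         N=[]
--         for E in M:
--             X=list(E)
--             for value in [0,1]:
--                 for e in indices:
--                     X[e]=value
--                 N.append(tuple(X))
--         M=N
--     return M
-- ===== SOURCE B (Python) =====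
-- def generate_perms_marked(data):
--     variants = {E: [] for E in set(data)}
--     for i in range(len(data)):
--         variants[data[i]].append(i)
--     variants.pop(0)
--     variants.pop(1)
--     L = sorted(variants)
--     if not L:
--         return [data]
--     k = len(L)
--     out = []
--     for c in range(2 ** k):
--         X = list(data)
--         for j in range(k):
--             bit = (c // (2 ** (k - 1 - j))) % 2
--             for e in variants[L[j]]:
--                 X[e] = bit
--         out.append(tuple(X))
--     return out
-- ===== Notes on version B (the rewrite author's own statement) =====
-- stated objective: alternative
-- what changed: Replaces A's level-by-level doubling of the partial-assignment list (one pass per variable, each pass rewriting the whole list) with a single direct enumeration that decodes every integer c in range(2**k) into the k variable bits arithmetically.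
import Mathlib
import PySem

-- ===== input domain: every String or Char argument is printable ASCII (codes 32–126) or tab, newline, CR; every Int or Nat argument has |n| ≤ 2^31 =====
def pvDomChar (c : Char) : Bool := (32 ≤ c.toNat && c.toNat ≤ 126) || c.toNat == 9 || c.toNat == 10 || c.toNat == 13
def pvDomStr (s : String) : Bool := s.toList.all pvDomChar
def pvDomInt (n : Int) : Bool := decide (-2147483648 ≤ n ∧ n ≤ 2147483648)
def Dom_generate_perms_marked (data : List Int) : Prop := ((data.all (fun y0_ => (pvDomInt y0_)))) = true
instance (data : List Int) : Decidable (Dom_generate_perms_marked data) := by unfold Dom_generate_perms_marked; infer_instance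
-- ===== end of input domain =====

-- B replaces A's level-by-level doubling of the assignment list by directly decoding each
-- integer c in range(2**k) into the k variable bits; same results in the same order (alternative, not faster).


-- ===== PORT A =====
-- shared helper: the loop 'for e in indices: X[e] = value' (this line is verbatim identical in Source A and Source B)
def pvSetIdx (X : List Int) (indices : List Int) (value : Int) : List Int :=
  indices.foldl (fun X e => PySem.List.pySetD X e value) X

-- shared helper: the five preprocessing lines that are verbatim identical in Source A and Source B:
-- variants = {E: [] for E in set(data)}; the index-appending loop; variants.pop(0); variants.pop(1).
-- 'none' = the KeyError of an unguarded pop (excluded by Pre_).  variants[data[i]].append(i) is ported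
-- with Dict.modify (exact: the key data[i] is always present, having been inserted from set(data)).
def pvPrep (data : List Int) : Option (PySem.Dict Int (List Int)) :=
  let v0 : PySem.Dict Int (List Int) :=
    (PySem.Set.ofList data).foldl (fun d E => d.insert E []) PySem.Dict.empty
  let v1 := (PySem.List.pyRange 0 data.length 1).foldl
    (fun d i => d.modify (PySem.List.pyGetD data i 0) [] (fun l => l ++ [i])) v0
  match v1.pop? 0 with
  | none => none
  | some (_, d1) =>
    match d1.pop? 1 with
    | none => none
    | some (_, d2) => some d2

def generate_perms_marked (data : List Int) : List (List Int) :=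
  match pvPrep data with
  | none => []      -- KeyError in Python; outside Pre_
  | some variants =>
    let L := PySem.List.sorted variants.keys (fun x => x) false
    L.foldl (fun M var =>
      let indices := variants.getD var []
      M.foldl (fun N E =>
        (([(0 : Int), 1].foldl (fun (acc : List (List Int) × List Int) value =>
          let X := pvSetIdx acc.2 indices value
          (acc.1 ++ [X], X)) (N, E)).1)) []) [data]

-- ===== PORT B =====
def generate_perms_marked_alt (data : List Int) : List (List Int) :=
  match pvPrep data with
  | none => []      -- KeyError in Python; outside Pre_
  | some variants =>
    let L := PySem.List.sorted variants.keys (fun x => x) false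
    if L = [] then [data]
    else
      let k : Int := L.length
      (PySem.List.pyRange 0 ((2 : Int) ^ L.length) 1).foldl (fun out c =>
        let X := (PySem.List.pyRange 0 k 1).foldl (fun X j =>
          let bit := PySem.Int.mod (PySem.Int.floordiv c ((2 : Int) ^ (k - 1 - j).toNat)) 2
          pvSetIdx X (variants.getD (PySem.List.pyGetD L j 0) []) bit) data
        out ++ [X]) []

-- ===== PRECONDITION & SPEC =====
-- Pre_ excludes exactly the inputs on which A raises KeyError (0 or 1 not occurring in data);
-- B raises the same KeyError there.
def Pre_generate_perms_marked (data : List Int) : Prop := 0 ∈ data ∧ 1 ∈ data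
instance (data : List Int) : Decidable (Pre_generate_perms_marked data) := by
  unfold Pre_generate_perms_marked; infer_instance
def pvWitness_generate_perms_marked : List Int := [0, 1, 7]

def Spec_generate_perms_marked (data : List Int) (out : List (List Int)) : Prop := out = generate_perms_marked_alt data
instance (data : List Int) (out : List (List Int)) : Decidable (Spec_generate_perms_marked data out) := by unfold Spec_generate_perms_marked; infer_instance

-- ===== CLAIM (what is proved, stated in full; the proofs are below) =====
def Claim_equal_generate_perms_marked : Prop := ∀ (data : List Int), Dom_generate_perms_marked data → Pre_generate_perms_marked data → Spec_generate_perms_marked data (generate_perms_marked data)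

-- ===== LEMMAS AND PROOFS =====

-- proof-side abstractions: both ports, after the shared preprocessing, only use
-- f := fun var => variants.getD var [] and the sorted key list.
def pvExpand (f : Int → List Int) (L : List Int) (M : List (List Int)) : List (List Int) :=
  L.foldl (fun M var => M.flatMap (fun E => [pvSetIdx E (f var) 0, pvSetIdx E (f var) 1])) M

def pvDecode (f : Int → List Int) (X0 : List Int) (L : List Int) (c : Int) : List Int :=
  (PySem.List.pyRange 0 (L.length : Int) 1).foldl (fun X j =>
    pvSetIdx X (f (PySem.List.pyGetD L j 0))
      (PySem.Int.mod (PySem.Int.floordiv c ((2 : Int) ^ ((L.length : Int) - 1 - j).toNat)) 2)) X0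

-- a Nat-indexed variant of pvSetIdx used only to reason about it
def pvSetN (E : List Int) (ks : List Nat) (b : Int) : List Int :=
  ks.foldl (fun X k => X.set k b) E

theorem length_pvSetN (ks : List Nat) (E : List Int) (b : Int) :
    (pvSetN E ks b).length = E.length := by
  induction ks generalizing E with
  | nil => rfl
  | cons k ks ih =>
    simp only [pvSetN, List.foldl_cons] at *
    rw [ih, List.length_set]

theorem pvSetN_getElem? (ks : List Nat) (E : List Int) (b : Int) (p : Nat) :
    (pvSetN E ks b)[p]? = if p ∈ ks ∧ p < E.length then some b else E[p]? := by
  induction ks generalizing E with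
  | nil => simp [pvSetN]
  | cons k ks ih =>
    simp only [pvSetN, List.foldl_cons] at *
    rw [ih]
    simp only [List.length_set, List.getElem?_set, List.mem_cons]
    by_cases hp : p < E.length
    · split_ifs <;> simp_all
    · have : E[p]? = none := List.getElem?_eq_none (by omega)
      split_ifs <;> simp_all

theorem pvSetIdx_eq_setN (I : List Int) (E : List Int) (b : Int) :
    pvSetIdx E I b = pvSetN E (I.filterMap (PySem.List.pyIdx? E.length)) b := by
  induction I generalizing E with
  | nil => rfl
  | cons e I ih =>
    simp only [pvSetIdx, List.foldl_cons, List.filterMap_cons] at *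
    cases h : PySem.List.pyIdx? E.length e with
    | none =>
      have he : PySem.List.pySetD E e b = E := by
        simp [PySem.List.pySetD, PySem.List.pySet?, h]
      rw [he] at *
      exact ih E
    | some k =>
      have he : PySem.List.pySetD E e b = E.set k b := by
        simp [PySem.List.pySetD, PySem.List.pySet?, h]
      rw [he] at *
      have := ih (E.set k b)
      rw [List.length_set] at this
      simpa [pvSetN] using this

theorem pvSetN_twice (ks : List Nat) (E : List Int) (a b : Int) :
    pvSetN (pvSetN E ks a) ks b = pvSetN E ks b := by
  apply List.ext_getElem?
  intro p
  rw [pvSetN_getElem? ks _ b p, pvSetN_getElem? ks E b p, length_pvSetN]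
  split_ifs with h
  · rfl
  · rw [pvSetN_getElem?]
    simp_all

theorem pvSetIdx_twice (I : List Int) (E : List Int) (a b : Int) :
    pvSetIdx (pvSetIdx E I a) I b = pvSetIdx E I b := by
  rw [pvSetIdx_eq_setN (E := E) (b := a), pvSetIdx_eq_setN, pvSetIdx_eq_setN (E := E) (b := b),
    length_pvSetN]
  exact pvSetN_twice _ _ _ _

theorem pvDecode_eq_natFold (f : Int → List Int) (X0 : List Int) (L : List Int) (c : Int) :
    pvDecode f X0 L c = (List.range L.length).foldl (fun X jn =>
      pvSetIdx X (f (L.getD jn 0))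
        (PySem.Int.mod (PySem.Int.floordiv c ((2 : Int) ^ (L.length - 1 - jn))) 2)) X0 := by
  unfold pvDecode
  rw [PySem.List.pyRange_one]
  have hN : ((L.length : Int) - 0).toNat = L.length := by omega
  rw [hN, List.foldl_map]
  apply PySem.List.foldl_congr_mem
  intro acc jn _
  have h2 : (0 : Int) + (jn : Int) = (jn : Int) := by omega
  rw [h2]
  have h1 : ((L.length : Int) - 1 - (jn : Int)).toNat = L.length - 1 - jn := by omega
  rw [h1, PySem.List.pyGetD_natCast]

-- the c-th bit arithmetic: peeling the last (least significant) variable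
theorem pvBit_shift (c b m : Nat) (hb : b < 2) :
    PySem.Int.floordiv ((2 * c + b : Nat) : Int) ((2 : Int) ^ (m + 1)) =
      PySem.Int.floordiv ((c : Nat) : Int) ((2 : Int) ^ m) := by
  have e1 : ((2 : Int) ^ (m + 1)) = (((2 ^ (m + 1) : Nat)) : Int) := by push_cast; ring
  have e2 : ((2 : Int) ^ m) = (((2 ^ m : Nat)) : Int) := by push_cast; ring
  rw [e1, e2, PySem.Int.floordiv_natCast, PySem.Int.floordiv_natCast]
  congr 1
  have : 2 ^ (m + 1) = 2 * 2 ^ m := by rw [pow_succ]; ring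
  rw [this, ← Nat.div_div_eq_div_mul]
  congr 1
  omega

theorem pvDecode_append (f : Int → List Int) (X0 : List Int) (L : List Int) (v : Int)
    (c b : Nat) (hb : b < 2) :
    pvDecode f X0 (L ++ [v]) (((2 * c + b : Nat) : Int)) =
      pvSetIdx (pvDecode f X0 L ((c : Nat) : Int)) (f v) ((b : Nat) : Int) := by
  rw [pvDecode_eq_natFold, pvDecode_eq_natFold]
  have hlen : (L ++ [v]).length = L.length + 1 := by simp
  rw [hlen, List.range_succ, List.foldl_append, List.foldl_cons, List.foldl_nil]
  have hget : (L ++ [v]).getD L.length 0 = v := by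
    simp [List.getD]
  have hexp : L.length + 1 - 1 - L.length = 0 := by omega
  have hbit : PySem.Int.mod (PySem.Int.floordiv ((2 * c + b : Nat) : Int)
      ((2 : Int) ^ (L.length + 1 - 1 - L.length))) 2 = ((b : Nat) : Int) := by
    rw [hexp, pow_zero]
    have e1 : (1 : Int) = ((1 : Nat) : Int) := by norm_num
    have e2 : (2 : Int) = ((2 : Nat) : Int) := by norm_num
    rw [e1, PySem.Int.floordiv_natCast, e2, PySem.Int.mod_natCast]
    congr 1
    omega
  rw [hget, hbit]
  congr 1
  apply PySem.List.foldl_congr_mem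
  intro acc jn hjn
  have hjn' : jn < L.length := List.mem_range.mp hjn
  have hg : (L ++ [v]).getD jn 0 = L.getD jn 0 := List.getD_append _ _ _ _ hjn'
  have he : L.length + 1 - 1 - jn = (L.length - 1 - jn) + 1 := by omega
  rw [hg, he, pvBit_shift c b _ hb]

theorem pvRange_double (m : Nat) :
    List.range (2 * m) = (List.range m).flatMap (fun c => [2 * c, 2 * c + 1]) := by
  induction m with
  | zero => rfl
  | succ m ih =>
    have h : 2 * (m + 1) = (2 * m + 1) + 1 := by ring
    rw [h, List.range_succ, List.range_succ, ih, List.range_succ]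
    simp

theorem pvExpand_eq_map (f : Int → List Int) (X0 : List Int) (L : List Int) :
    pvExpand f L [X0] =
      (List.range (2 ^ L.length)).map (fun c => pvDecode f X0 L ((c : Nat) : Int)) := by
  induction L using List.reverseRecOn with
  | nil =>
    simp [pvExpand, pvDecode, List.range_one]
  | append_singleton L v ih =>
    unfold pvExpand at *
    rw [List.foldl_append, List.foldl_cons, List.foldl_nil, ih]
    have hlen : (L ++ [v]).length = L.length + 1 := by simp
    have hpow : 2 ^ (L.length + 1) = 2 * 2 ^ L.length := by rw [pow_succ]; ring
    rw [hlen, hpow, pvRange_double, List.flatMap_map, List.map_flatMap]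
    apply List.flatMap_congr
    intro c _
    have h0 : pvDecode f X0 (L ++ [v]) ((2 * c : Nat) : Int) =
        pvSetIdx (pvDecode f X0 L ((c : Nat) : Int)) (f v) 0 := by
      have := pvDecode_append f X0 L v c 0 (by omega)
      simpa using this
    have h1 : pvDecode f X0 (L ++ [v]) ((2 * c + 1 : Nat) : Int) =
        pvSetIdx (pvDecode f X0 L ((c : Nat) : Int)) (f v) 1 := by
      have := pvDecode_append f X0 L v c 1 (by omega)
      simpa using this
    simp only [List.map_cons, List.map_nil]
    push_cast at h0 h1 ⊢
    rw [h0, h1]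

-- ===== VERDICT (by name: the statement is the Claim_ definition above) =====
theorem generate_perms_marked_spec : Claim_equal_generate_perms_marked := by
  intro data _ _
  show generate_perms_marked data = generate_perms_marked_alt data
  unfold generate_perms_marked generate_perms_marked_alt
  cases hp : pvPrep data with
  | none => rfl
  | some variants =>
    simp only []
    have hA : ∀ (M : List (List Int)) (var : Int),
        M.foldl (fun N E =>
          (([(0 : Int), 1].foldl (fun (acc : List (List Int) × List Int) value =>
            let X := pvSetIdx acc.2 (variants.getD var []) value
            (acc.1 ++ [X], X)) (N, E)).1)) []
        = M.flatMap (fun E =>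
            [pvSetIdx E (variants.getD var []) 0, pvSetIdx E (variants.getD var []) 1]) := by
      intro M var
      have hfun : (fun (N : List (List Int)) (E : List Int) =>
          (([(0 : Int), 1].foldl (fun (acc : List (List Int) × List Int) value =>
            let X := pvSetIdx acc.2 (variants.getD var []) value
            (acc.1 ++ [X], X)) (N, E)).1))
          = fun N E =>
            N ++ [pvSetIdx E (variants.getD var []) 0, pvSetIdx E (variants.getD var []) 1] := by
        funext N E
        simp only [List.foldl_cons, List.foldl_nil]
        rw [pvSetIdx_twice]
        simp
      rw [hfun, PySem.List.foldl_append_eq_flatMap]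
      simp
    set Ls := PySem.List.sorted variants.keys (fun x => x) false with hLs
    have hAeq : Ls.foldl (fun M var =>
          M.foldl (fun N E =>
            (([(0 : Int), 1].foldl (fun (acc : List (List Int) × List Int) value =>
              let X := pvSetIdx acc.2 (variants.getD var []) value
              (acc.1 ++ [X], X)) (N, E)).1)) []) [data]
        = pvExpand (fun var => variants.getD var []) Ls [data] := by
      unfold pvExpand
      apply PySem.List.foldl_congr_mem
      intro acc x _
      exact hA acc x
    rw [hAeq]
    by_cases hL : Ls = []
    · rw [if_pos hL, hL]
      rfl
    · rw [if_neg hL]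
      have hB : (PySem.List.pyRange 0 ((2 : Int) ^ Ls.length) 1).foldl (fun out c =>
            out ++ [pvDecode (fun var => variants.getD var []) data Ls c]) []
          = (PySem.List.pyRange 0 ((2 : Int) ^ Ls.length) 1).map
              (pvDecode (fun var => variants.getD var []) data Ls) := by
        simpa using PySem.List.foldl_append_singleton_eq_map
          (pvDecode (fun var => variants.getD var []) data Ls)
          (PySem.List.pyRange 0 ((2 : Int) ^ Ls.length) 1) []
      rw [show ((PySem.List.pyRange 0 ((2 : Int) ^ Ls.length) 1).foldl (fun out c =>
            let X := (PySem.List.pyRange 0 ((Ls.length : Int)) 1).foldl (fun X j =>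
              let bit := PySem.Int.mod (PySem.Int.floordiv c
                ((2 : Int) ^ (((Ls.length : Int)) - 1 - j).toNat)) 2
              pvSetIdx X (variants.getD (PySem.List.pyGetD Ls j 0) []) bit) data
            out ++ [X]) [] : List (List Int))
          = (PySem.List.pyRange 0 ((2 : Int) ^ Ls.length) 1).foldl (fun out c =>
            out ++ [pvDecode (fun var => variants.getD var []) data Ls c]) [] from rfl]
      rw [hB]
      have hR : PySem.List.pyRange 0 ((2 : Int) ^ Ls.length) 1
          = (List.range (2 ^ Ls.length)).map (fun k => ((k : Nat) : Int)) := by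
        rw [PySem.List.pyRange_one]
        have h1 : ((2 : Int) ^ Ls.length - 0).toNat = 2 ^ Ls.length := by
          rw [sub_zero, show ((2 : Int) ^ Ls.length) = (((2 ^ Ls.length : Nat)) : Int) from by
            push_cast; ring, Int.toNat_natCast]
        rw [h1]
        simp
      rw [hR, List.map_map, pvExpand_eq_map]
      rfl
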